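-- pv_equiv track=rewrite | github.com/whaaswijk/IWLS17-Competition | gen_gates.py | drop_left
-- ===== SOURCE A (Python) =====
-- def drop_left(n, symbols):
-- 	res = []
-- 	add_on_level = 0
-- 	skip = 0
-- 	symbols_on_level = 1
-- 	symbols_encountered = 0
-- 	for i in range(n+1):
-- 		add = symbols[skip:skip+add_on_level]
-- 		res = res + add
-- 		symbols_encountered += symbols_on_level
-- 		skip = symbols_encountered + 1
-- 		symbols_on_level += 1
-- 		add_on_level += 1
-- 	return res
-- ===== SOURCE B (Python) =====
-- def drop_left(n, symbols):
--     # One left-to-right pass over the relevant prefix: an element is kept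
--     # exactly when its index is not a triangular number (the leftmost symbol
--     # of each level); no per-level slicing or accumulator threading.
--     if n < 0:
--         return []
--     limit = (n + 1) * (n + 2) // 2
--     res = []
--     next_drop = 0
--     level = 1
--     for idx, s in enumerate(symbols[:limit]):
--         if idx == next_drop:
--             next_drop += level
--             level += 1
--         else:
--             res.append(s)
--     return res
-- ===== Notes on version B (the rewrite author's own statement) =====
-- stated objective: faster
-- what changed: Instead of A's per-level slicing driven by four running accumulators (skip, symbols_encountered, symbols_on_level, add_on_level) and quadratic res = res + add list rebuilding, B makes a single per-element pass over the relevant prefix and filters out exactly the elements at triangular indices (the leftmost symbol of each level), appending in place.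
import Mathlib
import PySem

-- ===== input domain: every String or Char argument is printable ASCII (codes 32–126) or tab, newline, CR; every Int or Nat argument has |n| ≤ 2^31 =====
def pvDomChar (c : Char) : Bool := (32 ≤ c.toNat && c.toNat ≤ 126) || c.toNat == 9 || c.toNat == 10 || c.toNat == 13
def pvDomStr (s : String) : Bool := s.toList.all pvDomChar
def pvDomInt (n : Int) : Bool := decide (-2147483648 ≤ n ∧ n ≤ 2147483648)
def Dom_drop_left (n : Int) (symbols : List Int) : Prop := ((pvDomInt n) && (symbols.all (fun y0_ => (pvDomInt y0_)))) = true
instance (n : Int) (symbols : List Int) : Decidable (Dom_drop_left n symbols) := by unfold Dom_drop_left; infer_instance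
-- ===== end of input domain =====

-- B replaces A's per-level slicing with running accumulators by a single per-element
-- filter pass that drops exactly the elements at triangular indices, avoiding A's quadratic
-- res = res + add rebuilding (objective: faster, measured).

-- ===== PORT A =====
-- state: (res, add_on_level, skip, symbols_on_level, symbols_encountered)
def dlStep (symbols : List Int) (s : List Int × Int × Int × Int × Int) (_i : Int) :
    List Int × Int × Int × Int × Int :=
  match s with
  | (res, add, skip, sol, se) =>
    (res ++ PySem.List.slice symbols (some skip) (some (skip + add)),
     add + 1, se + sol + 1, sol + 1, se + sol)

def drop_left (n : Int) (symbols : List Int) : List Int :=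
  (List.foldl (dlStep symbols) ([], 0, 0, 1, 0) (PySem.List.pyRange 0 (n + 1) 1)).1

-- ===== PORT B =====
-- state: (res, next_drop, level); per enumerated element (idx, s)
def dlBStep (st : List Int × Int × Int) (p : Int × Int) : List Int × Int × Int :=
  match st, p with
  | (res, nd, lv), (idx, s) =>
    if idx = nd then (res, nd + lv, lv + 1) else (res ++ [s], nd, lv)

def drop_left_alt (n : Int) (symbols : List Int) : List Int :=
  if n < 0 then []
  else
    let limit := PySem.Int.floordiv ((n + 1) * (n + 2)) 2
    ((PySem.List.enumerate (PySem.List.slice symbols none (some limit)) 0).foldl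
      dlBStep ([], 0, 1)).1

-- ===== PRECONDITION & SPEC =====
def Spec_drop_left (n : Int) (symbols : List Int) (out : List Int) : Prop := out = drop_left_alt n symbols
instance (n : Int) (symbols : List Int) (out : List Int) : Decidable (Spec_drop_left n symbols out) := by unfold Spec_drop_left; infer_instance

-- ===== CLAIM (what is proved, stated in full; the proofs are below) =====
def Claim_equal_drop_left : Prop := ∀ (n : Int) (symbols : List Int), Dom_drop_left n symbols → Spec_drop_left n symbols (drop_left n symbols)

-- ===== LEMMAS AND PROOFS =====

-- the slice taken by A's level i, and A's per-level result as a flat map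
def dlLevel (symbols : List Int) (i : Int) : List Int :=
  let start := PySem.Int.floordiv (i * (i + 1)) 2 + 1
  PySem.List.slice symbols (some start) (some (start + i))

def dlPrefix (symbols : List Int) (m : Nat) : List Int :=
  (List.range m).flatMap (fun (k : Nat) => dlLevel symbols ((0 : Int) + (k : Int)))

lemma tri_succ (m : Nat) : (m + 1) * (m + 1 + 1) / 2 = m * (m + 1) / 2 + (m + 1) := by
  have h : (m + 1) * (m + 1 + 1) = m * (m + 1) + 2 * (m + 1) := by ring
  omega

lemma tri_succ_int (m : Nat) :
    ((((m + 1) * (m + 1 + 1) / 2 : Nat)) : Int) = ((m * (m + 1) / 2 : Nat) : Int) + ((m : Int) + 1) := by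
  exact_mod_cast tri_succ m

lemma tri_mono {a b : Nat} (h : a ≤ b) : a * (a + 1) / 2 ≤ b * (b + 1) / 2 :=
  Nat.div_le_div_right (Nat.mul_le_mul h (by omega))

lemma dlPrefix_succ (symbols : List Int) (m : Nat) :
    dlPrefix symbols (m + 1) = dlPrefix symbols m ++ dlLevel symbols ((0 : Int) + (m : Int)) := by
  rw [dlPrefix, dlPrefix, List.range_succ, List.flatMap_append]
  simp

-- A's fold, fully characterised (state after m iterations)
lemma dlFold (symbols : List Int) (m : Nat) :
    List.foldl (dlStep symbols) ([], 0, 0, 1, 0) ((List.range m).map (fun (k : Nat) => (0 : Int) + (k : Int))) =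
    (dlPrefix symbols m, (m : Int),
     if m = 0 then 0 else ((m * (m + 1) / 2 : Nat) : Int) + 1,
     (m : Int) + 1, ((m * (m + 1) / 2 : Nat) : Int)) := by
  induction m with
  | zero => simp [dlPrefix]
  | succ m ih =>
    rw [List.range_succ, List.map_append, List.foldl_append, ih]
    simp only [List.map_cons, List.map_nil, List.foldl_cons, List.foldl_nil, dlStep,
      Prod.mk.injEq]
    refine ⟨?_, by push_cast; rfl, ?_, by push_cast; rfl, ?_⟩
    · -- result list component
      rw [dlPrefix_succ]
      congr 1
      rw [dlLevel]
      have hcast : ((0 : Int) + (m : Int)) * (((0 : Int) + (m : Int)) + 1) = ((m * (m + 1) : Nat) : Int) := by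
        push_cast; ring
      rw [hcast]
      have hfd : PySem.Int.floordiv ((m * (m + 1) : Nat) : Int) 2 = ((m * (m + 1) / 2 : Nat) : Int) := by
        exact_mod_cast PySem.Int.floordiv_natCast (m * (m + 1)) 2
      rw [hfd]
      rcases Nat.eq_zero_or_pos m with hm | hm
      · -- level 0: both slices are empty
        subst hm
        rw [if_pos rfl]
        rw [PySem.List.slice_toNat _ (by norm_num) (by norm_num),
            PySem.List.slice_toNat _ (by norm_num) (by norm_num)]
        norm_num
      · rw [if_neg (Nat.pos_iff_ne_zero.mp hm)]
        congr 1
        push_cast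
        ring
    · -- skip component
      rw [if_neg (Nat.succ_ne_zero m), tri_succ_int]
    · -- symbols_encountered component
      rw [tri_succ_int]

-- A's level slice as a drop/take on the triangular index
lemma dlLevel_natCast (symbols : List Int) (k : Nat) :
    dlLevel symbols ((0 : Int) + (k : Int)) = (symbols.drop (k * (k + 1) / 2 + 1)).take k := by
  rw [dlLevel, show (0 : Int) + (k : Int) = ((k : Nat) : Int) from by omega]
  have hcast : ((k : Nat) : Int) * (((k : Nat) : Int) + 1) = ((k * (k + 1) : Nat) : Int) := by
    push_cast; ring
  rw [hcast]
  have hfd : PySem.Int.floordiv ((k * (k + 1) : Nat) : Int) 2 = ((k * (k + 1) / 2 : Nat) : Int) := by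
    exact_mod_cast PySem.Int.floordiv_natCast (k * (k + 1)) 2
  rw [hfd]
  have h1 : ((k * (k + 1) / 2 : Nat) : Int) + 1 = ((k * (k + 1) / 2 + 1 : Nat) : Int) := by push_cast; ring
  rw [h1]
  exact PySem.List.slice_natCast_add symbols (k * (k + 1) / 2 + 1) k

-- B's fold over a run of non-dropped indices just appends them
lemma bfold_nohit (l : List Int) : ∀ (res : List Int) (nd lv base : Int),
    base + l.length ≤ nd →
    (PySem.List.enumerate l base).foldl dlBStep (res, nd, lv) = (res ++ l, nd, lv) := by
  induction l with
  | nil => intro res nd lv base _; simp [PySem.List.enumerate_nil]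
  | cons x xs ih =>
    intro res nd lv base h
    rw [PySem.List.enumerate_cons, List.foldl_cons]
    simp only [List.length_cons] at h
    have hlt : base < nd := by push_cast at h; omega
    rw [dlBStep, if_neg (by omega)]
    have h' : (base + 1) + xs.length ≤ nd := by push_cast at h ⊢; omega
    rw [ih (res ++ [x]) nd lv (base + 1) h']
    simp

-- B's fold processes the levels chunk by chunk
lemma bfold_chunks (symbols : List Int) : ∀ (k m : Nat) (res : List Int),
    ((PySem.List.enumerate ((symbols.drop (m * (m + 1) / 2)).take ((m + k) * (m + k + 1) / 2 - m * (m + 1) / 2)) ((m * (m + 1) / 2 : Nat) : Int)).foldl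
        dlBStep (res, ((m * (m + 1) / 2 : Nat) : Int), ((m : Int) + 1))).1
      = res ++ (List.range k).flatMap (fun j => (symbols.drop ((m + j) * (m + j + 1) / 2 + 1)).take (m + j)) := by
  intro k
  induction k with
  | zero =>
    intro m res
    simp [PySem.List.enumerate_nil]
  | succ k ih =>
    intro m res
    by_cases hlen : symbols.length ≤ m * (m + 1) / 2
    · -- symbols exhausted: everything is empty
      rw [List.drop_eq_nil_of_le hlen]
      simp only [List.take_nil, PySem.List.enumerate_nil, List.foldl_nil]
      have hrhs : (List.range (k + 1)).flatMap
          (fun j => (symbols.drop ((m + j) * (m + j + 1) / 2 + 1)).take (m + j)) = [] := by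
        apply List.flatMap_eq_nil_iff.mpr
        intro j _
        rw [List.drop_eq_nil_of_le (le_trans hlen (by have := tri_mono (Nat.le_add_right m j); omega))]
        simp
      rw [hrhs, List.append_nil]
    · push_neg at hlen
      -- first chunk is nonempty: split off level m
      have hsplit : (m + (k + 1)) * (m + (k + 1) + 1) / 2 - m * (m + 1) / 2 =
          (m + 1) + ((m + 1 + k) * (m + 1 + k + 1) / 2 - (m + 1) * (m + 1 + 1) / 2) := by
        have h1 := tri_succ m
        have h2 := tri_mono (show m + 1 ≤ m + 1 + k by omega)
        have h3 : m + (k + 1) = m + 1 + k := by omega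
        rw [h3]; omega
      rw [hsplit, List.take_add]
      have hdrop1 : (symbols.drop (m * (m + 1) / 2)).drop (m + 1) = symbols.drop ((m + 1) * (m + 1 + 1) / 2) := by
        rw [List.drop_drop]; congr 1; have := tri_succ m; omega
      rw [hdrop1]
      rw [List.drop_eq_getElem_cons hlen]
      simp only [List.take_succ_cons]
      rw [List.cons_append, PySem.List.enumerate_cons, List.foldl_cons]
      rw [dlBStep, if_pos rfl]
      rw [PySem.List.enumerate_append, List.foldl_append]
      set restA := (symbols.drop (m * (m + 1) / 2 + 1)).take m with hrestA
      have hrestlen : restA.length = min m (symbols.length - (m * (m + 1) / 2 + 1)) := by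
        rw [hrestA, List.length_take, List.length_drop]
      have hnd : ((m * (m + 1) / 2 : Nat) : Int) + ((m : Int) + 1) = (((m + 1) * (m + 1 + 1) / 2 : Nat) : Int) := by
        rw [tri_succ_int]
      rw [hnd]
      have hnohit : (((m * (m + 1) / 2 : Nat) : Int) + 1) + restA.length ≤ (((m + 1) * (m + 1 + 1) / 2 : Nat) : Int) := by
        rw [tri_succ_int]; push_cast; omega
      rw [bfold_nohit restA res (((m + 1) * (m + 1 + 1) / 2 : Nat) : Int) (((m : Int) + 1) + 1) _ hnohit]
      rw [List.range_succ_eq_map]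
      simp only [List.flatMap_cons]
      by_cases hfull : restA.length = m
      · have hbase : ((m * (m + 1) / 2 : Nat) : Int) + 1 + (restA.length : Int) = (((m + 1) * (m + 1 + 1) / 2 : Nat) : Int) := by
          rw [hfull, tri_succ_int]; push_cast; ring
        have hlv : ((m : Int) + 1) + 1 = (((m + 1 : Nat) : Int) + 1) := by push_cast; ring
        rw [hbase, hlv, ih (m + 1) (res ++ restA)]
        rw [List.append_assoc]
        congr 1
        simp only [Nat.add_zero]
        congr 1
        rw [List.flatMap_map]
        apply List.flatMap_congr
        intro j _
        have he : m + (j + 1) = m + 1 + j := by omega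
        rw [he]
      · -- partial last chunk: symbols end inside level m
        have hshort : symbols.length < m * (m + 1) / 2 + 1 + m := by omega
        have htail : symbols.drop ((m + 1) * (m + 1 + 1) / 2) = [] := by
          apply List.drop_eq_nil_of_le
          have := tri_succ m; omega
        rw [htail]
        simp only [List.take_nil, PySem.List.enumerate_nil, List.foldl_nil]
        have hrest0 : ((List.range k).map Nat.succ).flatMap
            (fun j => (symbols.drop ((m + j) * (m + j + 1) / 2 + 1)).take (m + j)) = [] := by
          apply List.flatMap_eq_nil_iff.mpr
          intro j hj
          simp only [List.mem_map, List.mem_range] at hj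
          obtain ⟨j', _, rfl⟩ := hj
          rw [List.drop_eq_nil_of_le]
          · simp
          · have h1 := tri_mono (show m + 1 ≤ m + Nat.succ j' by omega)
            have := tri_succ m; omega
        rw [List.flatMap_map] at hrest0
        rw [List.flatMap_map, hrest0]
        simp [hrestA]

-- ===== VERDICT (by name: the statement is the Claim_ definition above) =====
theorem drop_left_spec : Claim_equal_drop_left := by
  intro n symbols _
  show drop_left n symbols = drop_left_alt n symbols
  by_cases hn : n < 0
  · rw [drop_left, drop_left_alt, if_pos hn, PySem.List.pyRange_one_eq_nil (by omega)]
    rfl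
  · push_neg at hn
    rw [drop_left, drop_left_alt, if_neg (by omega)]
    obtain ⟨N, rfl⟩ : ∃ N : Nat, n = (N : Int) := ⟨n.toNat, (Int.toNat_of_nonneg hn).symm⟩
    -- A side
    rw [PySem.List.pyRange_one, show ((N : Int) + 1 - 0).toNat = N + 1 by omega, dlFold]
    -- B side
    have hlim : PySem.Int.floordiv (((N : Int) + 1) * ((N : Int) + 2)) 2
        = (((N + 1) * (N + 1 + 1) / 2 : Nat) : Int) := by
      have hc : ((N : Int) + 1) * ((N : Int) + 2) = (((N + 1) * (N + 1 + 1) : Nat) : Int) := by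
        push_cast; ring
      rw [hc]
      exact_mod_cast PySem.Int.floordiv_natCast ((N + 1) * (N + 1 + 1)) 2
    simp only [hlim]
    rw [PySem.List.slice_to_natCast]
    have h0 : symbols.take ((N + 1) * (N + 1 + 1) / 2)
        = (symbols.drop (0 * (0 + 1) / 2)).take ((0 + (N + 1)) * (0 + (N + 1) + 1) / 2 - 0 * (0 + 1) / 2) := by
      norm_num
    rw [h0]
    have hB := bfold_chunks symbols (N + 1) 0 []
    norm_num at hB ⊢
    rw [hB]
    rw [dlPrefix]
    apply List.flatMap_congr
    intro k _
    rw [dlLevel_natCast]
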